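-- pv_equiv track=rewrite | github.com/colecperry/algorithms | LeetCode/bfs/433_BFS.py | minMutation
-- ===== SOURCE A (Python) =====
-- from collections import deque
-- from typing import List
--
-- def minMutation(startGene: str, endGene: str, bank: List[str]) -> int: # LC 433
--     """
--     TC: O(N * M * 4) where N = bank size, M = gene length (8)
--     For each gene, try 4 possible characters at each position
--     SC: O(N) - visited set and queue store genes from bank
--     """
--     if endGene not in bank:  # Target must be reachable (in bank)
--         return -1
--
--     bank_set = set(bank)  # Convert to set for O(1) lookup
--     visited = {startGene}  # Track explored genes to avoid cycles
--     queue = deque([(startGene, 0)])  # BFS queue: (current_gene, mutation_count)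
--     genes = ['A', 'C', 'G', 'T']  # Possible characters for gene string
--
--     def get_neighbors(gene):
--         """
--         Generate next states (neighbors) by trying all single-character mutations. This is the "implicit" part - we create edges on-the-fly based on rules.
--         """
--         neighbors = [] # list of neighbors -> one char different than input
--         for i in range(len(gene)):  # Try mutating each position
--             for char in genes:  # Try each possible character
--                 if char != gene[i]:  # Skip if same char
--                     neighbor = gene[:i] + char + gene[i+1:]  # Build new gene string
--                     if neighbor in bank_set:  # Only valid if exists in bank
--                         neighbors.append(neighbor)
--         return neighbors
--
--     # Standard BFS loop
--     while queue:
--         gene, mutations = queue.popleft()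
--
--         # Early termination: reached target
--         if gene == endGene:
--             return mutations
--
--         # Explore all valid next states (one mutation away)
--         for next_gene in get_neighbors(gene):
--             if next_gene not in visited:  # Haven't explored this gene yet
--                 visited.add(next_gene)  # Mark as explored
--                 queue.append((next_gene, mutations + 1))  # Add to queue with incremented count
--
--     return -1  # Exhausted all possibilities, no path exists
-- ===== SOURCE B (Python) =====
-- def minMutation(startGene, endGene, bank):
--     """Level-synchronous BFS: expand whole frontiers at once, finding each
--     next level by scanning the bank for one-valid-mutation words."""
--     if endGene not in bank:
--         return -1
--     visited = {startGene}
--     frontier = [startGene]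
--     steps = 0
--     while frontier:
--         if endGene in frontier:
--             return steps
--         next_frontier = []
--         for gene in frontier:
--             for word in bank:
--                 if word not in visited and one_mutation(gene, word):
--                     visited.add(word)
--                     next_frontier.append(word)
--         frontier = next_frontier
--         steps += 1
--     return -1
--
--
-- def one_mutation(gene, word):
--     """word is gene with exactly one position changed to a (different) valid base."""
--     if len(word) != len(gene):
--         return False
--     diffs = [j for j in range(len(gene)) if word[j] != gene[j]]
--     return len(diffs) == 1 and word[diffs[0]] in ('A', 'C', 'G', 'T')
-- ===== Notes on version B (the rewrite author's own statement) =====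
-- stated objective: alternative
-- what changed: Replaces the deque-of-(gene,count)-pairs BFS that generates all 4*L single-character mutations per gene and filters them through a bank set, by a level-synchronous BFS that keeps a frontier list plus a step counter and finds each next level by scanning the bank for words one valid mutation away from a frontier gene.
import Mathlib
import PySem

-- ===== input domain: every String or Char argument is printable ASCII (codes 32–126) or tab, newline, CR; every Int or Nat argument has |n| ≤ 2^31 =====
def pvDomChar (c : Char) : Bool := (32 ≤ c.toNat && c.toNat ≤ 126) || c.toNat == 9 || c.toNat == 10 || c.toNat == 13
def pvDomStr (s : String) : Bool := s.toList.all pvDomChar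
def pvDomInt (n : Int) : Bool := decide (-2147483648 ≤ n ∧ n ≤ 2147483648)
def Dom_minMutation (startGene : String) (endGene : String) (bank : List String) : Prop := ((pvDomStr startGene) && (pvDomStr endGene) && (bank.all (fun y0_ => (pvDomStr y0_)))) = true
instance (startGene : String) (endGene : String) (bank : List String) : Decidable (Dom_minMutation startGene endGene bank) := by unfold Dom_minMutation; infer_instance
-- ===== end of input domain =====

-- B replaces A's deque-of-(gene,count) BFS with mutation generation by a level-synchronous
-- frontier BFS that scans the bank for one-valid-mutation words (alternative algorithm, same results).

-- ===== PORT A =====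
def pvGenes : List Char := ['A', 'C', 'G', 'T']

-- neighbor = gene[:i] + char + gene[i+1:]
def pvMk (gene : String) (i : Int) (ch : Char) : String :=
  String.ofList
    (PySem.List.slice gene.toList none (some i) ++ [ch] ++
     PySem.List.slice gene.toList (some (i + 1)) none)

-- get_neighbors: all single-character mutations of gene that lie in bank_set
def pvGetNeighbors (bankSet : PySem.Set String) (gene : String) : List String :=
  (PySem.List.pyRange 0 (PySem.Str.len gene) 1).foldl (fun neighbors i =>
    pvGenes.foldl (fun neighbors ch =>
      if ch ≠ PySem.List.pyGetD gene.toList i ' ' then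
        let neighbor := pvMk gene i ch
        if PySem.Set.contains bankSet neighbor then neighbors ++ [neighbor] else neighbors
      else neighbors) neighbors) []

-- the standard BFS while-loop over the deque of (gene, mutation_count) pairs;
-- fuel bounds the number of pops (bank.length + 1 always suffices: every enqueued gene is a
-- fresh member of visited ⊆ {startGene} ∪ bank)
def pvLoopA (bankSet : PySem.Set String) (endGene : String) :
    Nat → PySem.Set String → List (String × Int) → Int
  | _, _, [] => -1
  | 0, _, _ :: _ => -1
  | fuel + 1, visited, (gene, mutations) :: queue =>
    if gene = endGene then mutations
    else
      let st := (pvGetNeighbors bankSet gene).foldl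
        (fun st nx =>
          if PySem.Set.contains st.1 nx then st
          else (PySem.Set.add st.1 nx, st.2 ++ [(nx, mutations + 1)]))
        (visited, queue)
      pvLoopA bankSet endGene fuel st.1 st.2

def minMutation (startGene : String) (endGene : String) (bank : List String) : Int :=
  if endGene ∉ bank then -1
  else
    let bankSet : PySem.Set String := PySem.Set.ofList bank
    pvLoopA bankSet endGene (bank.length + 1) (PySem.Set.ofList [startGene]) [(startGene, 0)]

-- ===== PORT B =====
-- one_mutation: word is gene with exactly one position changed to a (different) valid base
def pvOneMutation (gene : String) (word : String) : Bool :=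
  if PySem.Str.len word ≠ PySem.Str.len gene then false
  else
    let diffs : List Int := (PySem.List.pyRange 0 (PySem.Str.len gene) 1).foldl
      (fun acc j =>
        if PySem.List.pyGetD word.toList j ' ' ≠ PySem.List.pyGetD gene.toList j ' ' then
          acc ++ [j]
        else acc) []
    if PySem.List.len diffs = 1 then
      ['A', 'C', 'G', 'T'].contains (PySem.List.pyGetD word.toList (PySem.List.pyGetD diffs 0 0) ' ')
    else false

-- level-synchronous BFS: one fuel unit per level (bank.length + 2 always suffices: every
-- non-final level moves at least one bank word into visited)
def pvLoopB (bank : List String) (endGene : String) :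
    Nat → PySem.Set String → List String → Int → Int
  | _, _, [], _ => -1
  | 0, _, _ :: _, _ => -1
  | fuel + 1, visited, frontier, steps =>
    if endGene ∈ frontier then steps
    else
      let st := frontier.foldl (fun st gene =>
        bank.foldl (fun (st : PySem.Set String × List String) word =>
          if !PySem.Set.contains st.1 word && pvOneMutation gene word then
            (PySem.Set.add st.1 word, st.2 ++ [word])
          else st) st)
        (visited, [])
      pvLoopB bank endGene fuel st.1 st.2 (steps + 1)

def minMutation_alt (startGene : String) (endGene : String) (bank : List String) : Int :=
  if endGene ∉ bank then -1
  else pvLoopB bank endGene (bank.length + 2) (PySem.Set.ofList [startGene]) [startGene] 0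

-- ===== PRECONDITION & SPEC =====
def Spec_minMutation (startGene : String) (endGene : String) (bank : List String) (out : Int) : Prop := out = minMutation_alt startGene endGene bank
instance (startGene : String) (endGene : String) (bank : List String) (out : Int) : Decidable (Spec_minMutation startGene endGene bank out) := by unfold Spec_minMutation; infer_instance

-- ===== CLAIM (what is proved, stated in full; the proofs are below) =====
def Claim_equal_minMutation : Prop := ∀ (startGene : String) (endGene : String) (bank : List String), Dom_minMutation startGene endGene bank → Spec_minMutation startGene endGene bank (minMutation startGene endGene bank)

-- ===== LEMMAS AND PROOFS =====

-- canonical "visit a candidate" step both level folds reduce to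
def pvStep (st : PySem.Set String × List String) (w : String) : PySem.Set String × List String :=
  if w ∈ st.1 then st else (PySem.Set.add st.1 w, st.2 ++ [w])

-- one whole BFS level: fold pvStep over each frontier gene's candidate list
def pvLevel (cand : String → List String) (v : PySem.Set String) (F : List String) :
    PySem.Set String × List String :=
  F.foldl (fun st g => (cand g).foldl pvStep st) (v, [])

-- A's candidate list for a gene / B's candidate list for a gene
def pvCandA (bank : List String) (g : String) : List String :=
  pvGetNeighbors (PySem.Set.ofList bank) g
def pvCandB (bank : List String) (g : String) : List String :=
  bank.filter (fun w => pvOneMutation g w)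

-- abstract level BFS on finsets, which both loops compute
def pvNew (bank : List String) (v F : Finset String) : Finset String :=
  bank.toFinset.filter (fun w => w ∉ v ∧ ∃ g ∈ F, pvOneMutation g w = true)

def pvAbs (bank : List String) (e : String) : Nat → Finset String → Finset String → Int → Int
  | 0, _, _, _ => -1
  | fuel + 1, v, F, d =>
    if F = ∅ then -1
    else if e ∈ F then d
    else pvAbs bank e fuel (v ∪ pvNew bank v F) (pvNew bank v F) (d + 1)

def pvMu (bank : List String) (v : Finset String) : Nat := (bank.toFinset \ v).card

-- ---- small structural lemmas ----
lemma pvLoopA_nil (bs : PySem.Set String) (e : String) (f : Nat) (v : PySem.Set String) :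
    pvLoopA bs e f v [] = -1 := by
  cases f <;> rfl

lemma pvLoopB_nil (bank : List String) (e : String) (f : Nat) (v : PySem.Set String) (d : Int) :
    pvLoopB bank e f v [] d = -1 := by
  cases f <;> rfl

lemma pvAbs_nil (bank : List String) (e : String) (f : Nat) (v : Finset String) (d : Int) :
    pvAbs bank e f v ∅ d = -1 := by
  cases f <;> simp [pvAbs]

-- snd of a pvStep fold only ever grows by appending
lemma pvStep_factor (ws : List String) :
    ∀ (v : PySem.Set String) (L : List String),
      ws.foldl pvStep (v, L) =
        ((ws.foldl pvStep (v, [])).1, L ++ (ws.foldl pvStep (v, [])).2) := by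
  induction ws with
  | nil => intro v L; simp
  | cons w ws ih =>
    intro v L
    simp only [List.foldl_cons]
    by_cases h : w ∈ v
    · simp only [pvStep, if_pos h]
      exact ih v L
    · simp only [pvStep, if_neg h, List.nil_append]
      rw [ih (PySem.Set.add v w) (L ++ [w]), ih (PySem.Set.add v w) [w]]
      simp

lemma pvLevel_factor (cand : String → List String) (F : List String) :
    ∀ (v : PySem.Set String) (L : List String),
      F.foldl (fun st g => (cand g).foldl pvStep st) (v, L) =
        ((pvLevel cand v F).1, L ++ (pvLevel cand v F).2) := by
  induction F with
  | nil => intro v L; simp [pvLevel]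
  | cons g F ih =>
    intro v L
    simp only [pvLevel, List.foldl_cons] at *
    rcases hst : (cand g).foldl pvStep (v, []) with ⟨v1, s1⟩
    rw [pvStep_factor (cand g) v L, hst, ih v1 (L ++ s1), ih v1 s1]
    simp

-- A's pair-queue inner fold is the canonical fold with the queue threaded through
lemma pvPairStep_eq (ws : List String) (m : Int) :
    ∀ (v : PySem.Set String) (Q : List (String × Int)),
      ws.foldl (fun st nx =>
          if PySem.Set.contains st.1 nx then st
          else (PySem.Set.add st.1 nx, st.2 ++ [(nx, m)])) (v, Q) =
        ((ws.foldl pvStep (v, [])).1,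
          Q ++ ((ws.foldl pvStep (v, [])).2).map (fun s => (s, m))) := by
  induction ws with
  | nil => intro v Q; simp
  | cons w ws ih =>
    intro v Q
    simp only [List.foldl_cons]
    by_cases h : w ∈ v
    · have hc : PySem.Set.contains v w = true := by
        simp [h]
      simp only [pvStep, hc, if_pos h, if_true]
      exact ih v Q
    · have hc : PySem.Set.contains v w = false := by
        simp [h]
      simp only [pvStep, hc, if_neg h, Bool.false_eq_true, if_false, List.nil_append]
      rw [ih (PySem.Set.add v w) (Q ++ [(w, m)]),
        pvStep_factor ws (PySem.Set.add v w) [w]]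
      simp

-- B's inner bank fold is the canonical fold over the filtered bank
lemma pvInnerB_eq (bank : List String) (g : String) (st : PySem.Set String × List String) :
    bank.foldl (fun (st : PySem.Set String × List String) word =>
        if !PySem.Set.contains st.1 word && pvOneMutation g word then
          (PySem.Set.add st.1 word, st.2 ++ [word])
        else st) st =
      (pvCandB bank g).foldl pvStep st := by
  have hstep : ∀ (st : PySem.Set String × List String) (w : String),
      (if !PySem.Set.contains st.1 w && pvOneMutation g w then
          (PySem.Set.add st.1 w, st.2 ++ [w])
        else st) =
      (if pvOneMutation g w then pvStep st w else st) := by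
    intro st w
    by_cases hm : pvOneMutation g w = true <;> by_cases hc : w ∈ st.1 <;>
      simp [pvStep, hm, hc]
  simp only [hstep]
  rw [PySem.List.foldl_if_eq_foldl_filter]
  rfl

-- full characterization of a pvStep fold
lemma pvStep_char (ws : List String) :
    ∀ (v : PySem.Set String) (L : List String),
      (∀ x ∈ L, x ∈ v) → L.Nodup →
      (∀ x, x ∈ (ws.foldl pvStep (v, L)).1 ↔ x ∈ v ∨ x ∈ ws) ∧
      (∀ x, x ∈ (ws.foldl pvStep (v, L)).2 ↔ x ∈ L ∨ (x ∈ ws ∧ x ∉ v)) ∧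
      (∀ x ∈ (ws.foldl pvStep (v, L)).2, x ∈ (ws.foldl pvStep (v, L)).1) ∧
      (ws.foldl pvStep (v, L)).2.Nodup := by
  induction ws with
  | nil =>
    intro v L hLv hnd
    refine ⟨fun x => by simp, fun x => by simp, hLv, hnd⟩
  | cons w ws ih =>
    intro v L hLv hnd
    simp only [List.foldl_cons]
    by_cases h : w ∈ v
    · simp only [pvStep, if_pos h]
      obtain ⟨h1, h2, h3, h4⟩ := ih v L hLv hnd
      refine ⟨fun x => ?_, fun x => ?_, h3, h4⟩
      · rw [h1 x, List.mem_cons]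
        constructor
        · tauto
        · rintro (hv | rfl | hw) <;> [tauto; exact Or.inl h; tauto]
      · rw [h2 x, List.mem_cons]
        constructor
        · tauto
        · rintro (hL | ⟨(rfl | hw), hv⟩) <;> tauto
    · simp only [pvStep, if_neg h]
      have hmemadd : ∀ y, y ∈ PySem.Set.add v w ↔ y ∈ v ∨ y = w :=
        fun y => PySem.Set.mem_add v w y
      have hLv' : ∀ x ∈ L ++ [w], x ∈ PySem.Set.add v w := by
        intro x hx
        rcases List.mem_append.mp hx with hx | hx
        · exact (hmemadd x).mpr (Or.inl (hLv x hx))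
        · rw [List.mem_singleton] at hx; exact (hmemadd x).mpr (Or.inr hx)
      have hwL : w ∉ L := fun hwL => h (hLv w hwL)
      have hnd' : (L ++ [w]).Nodup := by
        rw [List.nodup_append]
        refine ⟨hnd, List.nodup_singleton w, ?_⟩
        intro a ha b hb
        rw [List.mem_singleton] at hb
        subst hb
        intro he
        subst he
        exact hwL ha
      obtain ⟨h1, h2, h3, h4⟩ := ih (PySem.Set.add v w) (L ++ [w]) hLv' hnd'
      refine ⟨fun x => ?_, fun x => ?_, h3, h4⟩
      · rw [h1 x, hmemadd x, List.mem_cons]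
        tauto
      · rw [h2 x, List.mem_append, List.mem_singleton, List.mem_cons]
        constructor
        · rintro ((hL | rfl) | ⟨hws, hnv⟩)
          · tauto
          · exact Or.inr ⟨Or.inl rfl, h⟩
          · exact Or.inr ⟨Or.inr hws, fun hv => hnv ((hmemadd x).mpr (Or.inl hv))⟩
        · rintro (hL | ⟨(rfl | hws), hnv⟩)
          · tauto
          · tauto
          · by_cases hxw : x = w
            · tauto
            · refine Or.inr ⟨hws, fun hv => ?_⟩
              rcases (hmemadd x).mp hv with hv | hv
              · exact hnv hv
              · exact hxw hv

-- full characterization of a whole level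
lemma pvLevel_char (cand : String → List String) (F : List String) (v : PySem.Set String) :
    (∀ x, x ∈ (pvLevel cand v F).1 ↔ x ∈ v ∨ ∃ g ∈ F, x ∈ cand g) ∧
    (∀ x, x ∈ (pvLevel cand v F).2 ↔ x ∉ v ∧ ∃ g ∈ F, x ∈ cand g) ∧
    (pvLevel cand v F).2.Nodup := by
  suffices h : ∀ (F : List String) (v : PySem.Set String) (L : List String),
      (∀ x ∈ L, x ∈ v) → L.Nodup →
      (∀ x, x ∈ (F.foldl (fun st g => (cand g).foldl pvStep st) (v, L)).1 ↔
          x ∈ v ∨ ∃ g ∈ F, x ∈ cand g) ∧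
      (∀ x, x ∈ (F.foldl (fun st g => (cand g).foldl pvStep st) (v, L)).2 ↔
          x ∈ L ∨ (x ∉ v ∧ ∃ g ∈ F, x ∈ cand g)) ∧
      (∀ x ∈ (F.foldl (fun st g => (cand g).foldl pvStep st) (v, L)).2,
          x ∈ (F.foldl (fun st g => (cand g).foldl pvStep st) (v, L)).1) ∧
      (F.foldl (fun st g => (cand g).foldl pvStep st) (v, L)).2.Nodup by
    obtain ⟨h1, h2, _, h4⟩ := h F v [] (by simp) List.nodup_nil
    exact ⟨h1, fun x => by simpa using h2 x, h4⟩
  clear F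
  intro F
  induction F with
  | nil =>
    intro v L hLv hnd
    exact ⟨fun x => by simp, fun x => by simp, hLv, hnd⟩
  | cons g F ih =>
    intro v L hLv hnd
    simp only [List.foldl_cons]
    obtain ⟨g1, g2, g3, g4⟩ := pvStep_char (cand g) v L hLv hnd
    rcases hst : (cand g).foldl pvStep (v, L) with ⟨v1, L1⟩
    rw [hst] at g1 g2 g3 g4
    obtain ⟨h1, h2, h3, h4⟩ := ih v1 L1 g3 g4
    refine ⟨fun x => ?_, fun x => ?_, h3, h4⟩
    · rw [h1 x]
      constructor
      · rintro (hv1 | ⟨g', hg', hx⟩)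
        · rcases (g1 x).mp hv1 with hv | hcg
          · exact Or.inl hv
          · exact Or.inr ⟨g, by simp, hcg⟩
        · exact Or.inr ⟨g', List.mem_cons_of_mem _ hg', hx⟩
      · rintro (hv | ⟨g', hg', hx⟩)
        · exact Or.inl ((g1 x).mpr (Or.inl hv))
        · rcases List.mem_cons.mp hg' with rfl | hg'
          · exact Or.inl ((g1 x).mpr (Or.inr hx))
          · exact Or.inr ⟨g', hg', hx⟩
    · rw [h2 x]
      constructor
      · rintro (hL1 | ⟨hnv1, g', hg', hx⟩)
        · rcases (g2 x).mp hL1 with hL | ⟨hcg, hnv⟩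
          · exact Or.inl hL
          · exact Or.inr ⟨hnv, g, by simp, hcg⟩
        · have hnv : x ∉ v := fun hv => hnv1 ((g1 x).mpr (Or.inl hv))
          exact Or.inr ⟨hnv, g', List.mem_cons_of_mem _ hg', hx⟩
      · rintro (hL | ⟨hnv, g', hg', hx⟩)
        · exact Or.inl ((g2 x).mpr (Or.inl hL))
        · rcases List.mem_cons.mp hg' with rfl | hg'
          · exact Or.inl ((g2 x).mpr (Or.inr ⟨hx, hnv⟩))
          · by_cases hv1 : x ∈ v1
            · rcases (g1 x).mp hv1 with hv | hcg
              · exact absurd hv hnv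
              · exact Or.inl ((g2 x).mpr (Or.inr ⟨hcg, hnv⟩))
            · exact Or.inr ⟨hv1, g', hg', hx⟩

-- the two candidate lists have the same members: A's generated neighbors are exactly
-- the bank words one valid mutation away
lemma pvRangeFilterEq (n k : Nat) (h : k < n) :
    (List.range n).filter (fun j => j == k) = [k] := by
  induction n with
  | zero => omega
  | succ m ihm =>
    rw [List.range_succ, List.filter_append]
    by_cases hk : k = m
    · subst hk
      have hnil : (List.range k).filter (fun j => j == k) = [] := by
        rw [List.filter_eq_nil_iff]
        intro a ha
        rw [List.mem_range] at ha
        simp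
        omega
      simp [hnil]
    · have hlt : k < m := by omega
      simp [ihm hlt]
      omega

lemma pvMk_toList (g : String) (k : Nat) (ch : Char) (hk : k < g.toList.length) :
    (pvMk g (k : Int) ch).toList = g.toList.set k ch := by
  unfold pvMk
  rw [String.toList_ofList]
  rw [PySem.List.slice_to_natCast]
  have hcast : ((k : Int) + 1) = ((k + 1 : Nat) : Int) := by push_cast; ring
  rw [hcast, PySem.List.slice_from_natCast]
  rw [List.set_eq_take_append_cons_drop, if_pos hk]
  simp

-- A's generate-and-test form of the neighbor list
lemma pvGetNeighbors_eq (bs : PySem.Set String) (g : String) :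
    pvGetNeighbors bs g =
      (PySem.List.pyRange 0 (PySem.Str.len g) 1).flatMap (fun i =>
        (pvGenes.filter (fun ch =>
          decide (ch ≠ PySem.List.pyGetD g.toList i ' ' ∧ pvMk g i ch ∈ bs))).map (pvMk g i)) := by
  unfold pvGetNeighbors
  have hstep : ∀ (i : Int) (acc : List String) (ch : Char),
      (if ch ≠ PySem.List.pyGetD g.toList i ' ' then
        (if PySem.Set.contains bs (pvMk g i ch) then acc ++ [pvMk g i ch] else acc)
       else acc) =
      (if ch ≠ PySem.List.pyGetD g.toList i ' ' ∧ pvMk g i ch ∈ bs then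
        acc ++ [pvMk g i ch] else acc) := by
    intro i acc ch
    by_cases h1 : ch = PySem.List.pyGetD g.toList i ' '
    · rw [if_neg (fun hh => hh h1), if_neg (fun hh => hh.1 h1)]
    · by_cases h2 : pvMk g i ch ∈ bs
      · have hc : PySem.Set.contains bs (pvMk g i ch) = true :=
          (PySem.Set.contains_iff bs (pvMk g i ch)).mpr h2
        rw [if_pos h1, hc, if_pos rfl, if_pos ⟨h1, h2⟩]
      · have hc : PySem.Set.contains bs (pvMk g i ch) = false := by
          cases hcc : PySem.Set.contains bs (pvMk g i ch) with
          | false => rfl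
          | true => exact absurd ((PySem.Set.contains_iff bs (pvMk g i ch)).mp hcc) h2
        rw [if_pos h1, hc, if_neg (by simp), if_neg (fun hh => h2 hh.2)]
  simp only [hstep]
  have houter : ∀ (acc : List String) (i : Int),
      pvGenes.foldl (fun acc ch =>
        if ch ≠ PySem.List.pyGetD g.toList i ' ' ∧ pvMk g i ch ∈ bs then acc ++ [pvMk g i ch]
        else acc) acc =
      acc ++ (pvGenes.filter (fun ch =>
        decide (ch ≠ PySem.List.pyGetD g.toList i ' ' ∧ pvMk g i ch ∈ bs))).map (pvMk g i) := by
    intro acc i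
    exact PySem.List.foldl_append_ite
      (fun ch => ch ≠ PySem.List.pyGetD g.toList i ' ' ∧ pvMk g i ch ∈ bs)
      (pvMk g i) pvGenes acc
  simp only [houter]
  rw [PySem.List.foldl_append_eq_flatMap]
  simp

-- the mismatch list of w against g, as Nat indices
def pvDF (G W : List Char) : List Nat :=
  (List.range G.length).filter (fun j => decide (W.getD j ' ' ≠ G.getD j ' '))

lemma pvDF_of_set (G W : List Char) (k : Nat) (ch : Char) (hk : k < G.length)
    (hne : ch ≠ G.getD k ' ') (hset : W = G.set k ch) :
    pvDF G W = [k] := by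
  unfold pvDF
  have hcongr : ∀ j ∈ List.range G.length,
      decide (W.getD j ' ' ≠ G.getD j ' ') = (j == k) := by
    intro j hj
    rw [List.mem_range] at hj
    by_cases hjk : j = k
    · subst hjk
      have hW : W.getD j ' ' = ch := by
        rw [hset, List.getD_eq_getElem _ _ (by simpa using hj),
          List.getElem_set_self (by simpa using hj)]
      rw [hW, beq_self_eq_true]
      exact decide_eq_true hne
    · have hW : W.getD j ' ' = G.getD j ' ' := by
        rw [hset, List.getD_eq_getElem _ _ (by simpa using hj),
          List.getElem_set_ne (Ne.symm hjk) (by simpa using hj),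
          ← List.getD_eq_getElem _ ' ' hj]
      have hbk : (j == k) = false := by simp [hjk]
      rw [hW, hbk]
      exact decide_eq_false (fun hh => hh rfl)
  rw [List.filter_congr hcongr]
  exact pvRangeFilterEq _ _ hk

-- B's test characterized: w is g with exactly one position set to a fresh base
lemma pvOneMutation_iff (g w : String) :
    pvOneMutation g w = true ↔
      ∃ k : Nat, k < g.toList.length ∧ ∃ ch : Char, ch ∈ ['A', 'C', 'G', 'T'] ∧
        ch ≠ g.toList.getD k ' ' ∧ w.toList = g.toList.set k ch := by
  unfold pvOneMutation
  rw [PySem.Str.len_eq, PySem.Str.len_eq]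
  by_cases hlen : w.toList.length = g.toList.length
  · rw [if_neg (not_ne_iff.mpr (by exact_mod_cast hlen))]
    have hdiffs : (PySem.List.pyRange 0 ((g.toList.length : Int)) 1).foldl
        (fun acc j =>
          if PySem.List.pyGetD w.toList j ' ' ≠ PySem.List.pyGetD g.toList j ' ' then
            acc ++ [j]
          else acc) [] =
        (pvDF g.toList w.toList).map (fun k : Nat => (k : Int)) := by
      rw [PySem.List.foldl_append_ite_eq_filter, PySem.List.pyRange_zero_nat,
        List.filter_map, List.nil_append]
      unfold pvDF
      refine congrArg _ (List.filter_congr ?_)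
      intro j _
      simp [PySem.List.pyGetD_natCast]
    rw [hdiffs]
    simp only [PySem.List.len_eq, List.length_map]
    by_cases hone : (pvDF g.toList w.toList).length = 1
    · rw [if_pos (by exact_mod_cast hone)]
      obtain ⟨k0, hk0⟩ := List.length_eq_one_iff.mp hone
      have hk0mem : k0 ∈ pvDF g.toList w.toList := by rw [hk0]; simp
      have hk0lt : k0 < g.toList.length := by
        have := List.mem_filter.mp hk0mem
        simpa using this.1
      have hk0ne : w.toList.getD k0 ' ' ≠ g.toList.getD k0 ' ' := by
        have := List.mem_filter.mp hk0mem
        simpa using this.2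
      rw [hk0]
      simp only [List.map_cons, List.map_nil, PySem.List.pyGetD_zero_cons,
        PySem.List.pyGetD_natCast]
      rw [List.contains_iff_mem]
      constructor
      · intro hbase
        refine ⟨k0, hk0lt, w.toList.getD k0 ' ', hbase, hk0ne, ?_⟩
        apply List.ext_getElem (by simp [hlen])
        intro j hj1 hj2
        by_cases hjk : j = k0
        · subst hjk
          rw [List.getElem_set_self (by simpa using hk0lt),
            ← List.getD_eq_getElem _ ' ' hj1]
        · rw [List.getElem_set_ne (Ne.symm hjk) (by simpa using hj2)]
          have hjDF : j ∉ pvDF g.toList w.toList := by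
            rw [hk0]
            simpa using hjk
          have : ¬ (w.toList.getD j ' ' ≠ g.toList.getD j ' ') := by
            intro hne
            exact hjDF (List.mem_filter.mpr ⟨by simpa using hj2, by simpa using hne⟩)
          rw [not_ne_iff] at this
          rw [← List.getD_eq_getElem _ ' ' hj1, this,
            List.getD_eq_getElem _ ' ' (by simpa using hj2)]
      · rintro ⟨k, hk, ch, hchB, hchne, hset⟩
        have hDF : pvDF g.toList w.toList = [k] := pvDF_of_set _ _ _ _ hk hchne hset
        have hkk0 : k0 = k := by
          have := hDF ▸ hk0
          simpa using this.symm
        subst hkk0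
        have hW : w.toList.getD k0 ' ' = ch := by
          rw [hset, List.getD_eq_getElem _ _ (by simpa using hk),
            List.getElem_set_self (by simpa using hk)]
        rw [hW]
        exact hchB
    · rw [if_neg (by exact_mod_cast hone)]
      constructor
      · intro h; exact absurd h (by simp)
      · rintro ⟨k, hk, ch, _, hchne, hset⟩
        exact absurd (pvDF_of_set _ _ _ _ hk hchne hset)
          (fun h => hone (by rw [h]; rfl))
  · rw [if_pos (by exact_mod_cast hlen)]
    constructor
    · intro h; exact absurd h (by simp)
    · rintro ⟨k, hk, ch, _, _, hset⟩
      exact absurd (by rw [hset]; simp : w.toList.length = g.toList.length) hlen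

lemma pvGetNeighbors_mem (bs : PySem.Set String) (g x : String) :
    x ∈ pvGetNeighbors bs g ↔ x ∈ bs ∧ pvOneMutation g x = true := by
  rw [pvGetNeighbors_eq, List.mem_flatMap]
  rw [pvOneMutation_iff]
  constructor
  · rintro ⟨i, hi, hx⟩
    rw [List.mem_map] at hx
    obtain ⟨ch, hch, heq⟩ := hx
    rw [List.mem_filter, decide_eq_true_eq] at hch
    obtain ⟨hchG, hne, hmem⟩ := hch
    rw [PySem.List.mem_pyRange_one, PySem.Str.len_eq] at hi
    obtain ⟨hi0, hilt⟩ := hi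
    set k := i.toNat with hkdef
    have hik : i = (k : Int) := (Int.toNat_of_nonneg hi0).symm
    have hklt : k < g.toList.length := by omega
    rw [hik] at heq hne hmem
    rw [PySem.List.pyGetD_natCast] at hne
    refine ⟨heq ▸ hmem, k, hklt, ch, ?_, hne, ?_⟩
    · simpa [pvGenes] using hchG
    · rw [← heq, pvMk_toList g k ch hklt]
  · rintro ⟨hxbs, k, hk, ch, hchB, hne, hset⟩
    have hxmk : pvMk g (k : Int) ch = x := by
      have h1 : (pvMk g (k : Int) ch).toList = x.toList := by
        rw [pvMk_toList g k ch hk, ← hset]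
      have := congrArg String.ofList h1
      rwa [String.ofList_toList, String.ofList_toList] at this
    refine ⟨(k : Int), ?_, ?_⟩
    · rw [PySem.List.mem_pyRange_one, PySem.Str.len_eq]
      constructor
      · exact_mod_cast Nat.zero_le k
      · exact_mod_cast hk
    · rw [List.mem_map]
      refine ⟨ch, ?_, hxmk⟩
      rw [List.mem_filter, decide_eq_true_eq]
      refine ⟨by simpa [pvGenes] using hchB, ?_, hxmk ▸ hxbs⟩
      rw [PySem.List.pyGetD_natCast]
      exact hne

lemma pvCand_mem (bank : List String) (g x : String) :
    (x ∈ pvCandA bank g ↔ x ∈ bank ∧ pvOneMutation g x = true) ∧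
    (x ∈ pvCandB bank g ↔ x ∈ bank ∧ pvOneMutation g x = true) := by
  constructor
  · rw [pvCandA, pvGetNeighbors_mem, PySem.Set.mem_ofList]
  · rw [pvCandB, List.mem_filter]

-- processing one level of A's queue (e ∉ F handled in the else branch)
lemma pvLoopA_level (bank : List String) (e : String) (F : List String) :
    ∀ (N : List String) (v : PySem.Set String) (d : Int) (rest : Nat),
      pvLoopA (PySem.Set.ofList bank) e (F.length + rest) v
          (F.map (fun s => (s, d)) ++ N.map (fun s => (s, d + 1))) =
        if e ∈ F then d
        else
          pvLoopA (PySem.Set.ofList bank) e rest (pvLevel (pvCandA bank) v F).1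
            ((N ++ (pvLevel (pvCandA bank) v F).2).map (fun s => (s, d + 1))) := by
  induction F with
  | nil =>
    intro N v d rest
    simp [pvLevel]
  | cons g F ih =>
    intro N v d rest
    have hfuel : (g :: F).length + rest = (F.length + rest) + 1 := by
      simp only [List.length_cons]
      omega
    rw [hfuel]
    simp only [List.map_cons, List.cons_append]
    rw [pvLoopA]
    by_cases hge : g = e
    · rw [if_pos hge]
      have : e ∈ g :: F := by rw [← hge]; exact List.mem_cons_self ..
      rw [if_pos this]
    · rw [if_neg hge]
      simp only [pvPairStep_eq]
      rcases hst : (pvGetNeighbors (PySem.Set.ofList bank) g).foldl pvStep (v, []) with ⟨v1, s1⟩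
      simp only [List.append_assoc, ← List.map_append]
      have hlvl : pvLevel (pvCandA bank) v (g :: F) =
          ((pvLevel (pvCandA bank) v1 F).1, s1 ++ (pvLevel (pvCandA bank) v1 F).2) := by
        simp only [pvLevel, List.foldl_cons]
        have : (pvCandA bank g).foldl pvStep (v, []) = (v1, s1) := hst
        rw [this, pvLevel_factor (pvCandA bank) F v1 s1]
        rfl
      rw [ih (N ++ s1) v1 d rest]
      by_cases heF : e ∈ F
      · rw [if_pos heF]
        have : e ∈ g :: F := List.mem_cons_of_mem _ heF
        rw [if_pos this]
      · rw [if_neg heF]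
        have : e ∉ g :: F := by
          rw [List.mem_cons]
          rintro (h | h)
          · exact hge h.symm
          · exact heF h
        rw [if_neg this, hlvl]
        simp [List.append_assoc]

-- finset bookkeeping for a level (shared by A and B)
lemma pvLevel_finsets (bank : List String) (cand : String → List String)
    (hc : ∀ g x, x ∈ cand g ↔ x ∈ bank ∧ pvOneMutation g x = true)
    (v : PySem.Set String) (F : List String) :
    (pvLevel cand v F).1.toFinset = v.toFinset ∪ pvNew bank v.toFinset F.toFinset ∧
    (pvLevel cand v F).2.toFinset = pvNew bank v.toFinset F.toFinset ∧
    (pvLevel cand v F).2.Nodup := by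
  obtain ⟨h1, h2, h3⟩ := pvLevel_char cand F v
  have hc' : ∀ x, (∃ g ∈ F, x ∈ cand g) ↔ (x ∈ bank ∧ ∃ g ∈ F, pvOneMutation g x = true) := by
    intro x
    constructor
    · rintro ⟨g, hg, hx⟩
      rcases (hc g x).mp hx with ⟨hb, hm⟩
      exact ⟨hb, g, hg, hm⟩
    · rintro ⟨hb, g, hg, hm⟩
      exact ⟨g, hg, (hc g x).mpr ⟨hb, hm⟩⟩
  refine ⟨?_, ?_, h3⟩
  · ext x
    simp only [List.mem_toFinset, Finset.mem_union, pvNew, Finset.mem_filter, h1 x, hc' x]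
    constructor
    · rintro (hv | ⟨hb, hE⟩)
      · tauto
      · by_cases hxv : x ∈ v
        · tauto
        · exact Or.inr ⟨hb, hxv, hE⟩
    · rintro (hv | ⟨hb, _, hE⟩) <;> tauto
  · ext x
    simp only [List.mem_toFinset, pvNew, Finset.mem_filter, h2 x, hc' x]
    tauto

lemma pvMu_level (bank : List String) (v new : Finset String) (hsub : new ⊆ bank.toFinset \ v) :
    pvMu bank (v ∪ new) + new.card = pvMu bank v := by
  have hdisj : bank.toFinset \ (v ∪ new) = (bank.toFinset \ v) \ new := by
    ext x
    simp only [Finset.mem_sdiff, Finset.mem_union]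
    tauto
  unfold pvMu
  rw [hdisj, Finset.card_sdiff_of_subset hsub]
  have := Finset.card_le_card hsub
  omega

lemma pvNew_subset (bank : List String) (v F : Finset String) :
    pvNew bank v F ⊆ bank.toFinset \ v := by
  intro x hx
  simp only [pvNew, Finset.mem_filter, Finset.mem_sdiff] at *
  tauto

-- A's loop computes the abstract BFS (fuel sufficiency folded in)
lemma pvLoopA_abs (bank : List String) (e : String) :
    ∀ (m : Nat) (v : PySem.Set String) (F : List String) (d : Int) (fA k : Nat),
      pvMu bank v.toFinset ≤ m → F.Nodup →
      F.length + pvMu bank v.toFinset ≤ fA → pvMu bank v.toFinset < k →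
      pvLoopA (PySem.Set.ofList bank) e fA v (F.map (fun s => (s, d))) =
        pvAbs bank e k v.toFinset F.toFinset d := by
  intro m
  induction m using Nat.strong_induction_on with
  | _ m ih =>
    intro v F d fA k hm hnd hfa hk
    obtain ⟨k', rfl⟩ : ∃ k', k = k' + 1 := ⟨k - 1, by omega⟩
    by_cases hF : F = []
    · subst hF
      rw [List.map_nil, pvLoopA_nil, List.toFinset_nil, pvAbs_nil]
    · have hlev := pvLoopA_level bank e F [] v d (fA - F.length)
      have hfA' : F.length + (fA - F.length) = fA := by omega
      rw [hfA'] at hlev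
      simp only [List.map_nil, List.append_nil, List.nil_append] at hlev
      rw [hlev]
      have hFne : F.toFinset ≠ ∅ := by
        simpa [List.toFinset_eq_empty_iff] using hF
      by_cases he : e ∈ F
      · rw [if_pos he, pvAbs, if_neg hFne, if_pos (List.mem_toFinset.mpr he)]
      · rw [if_neg he, pvAbs, if_neg hFne, if_neg (fun h => he (List.mem_toFinset.mp h))]
        obtain ⟨hf1, hf2, hnd1⟩ := pvLevel_finsets bank (pvCandA bank)
          (fun g x => (pvCand_mem bank g x).1) v F
        by_cases hemp : (pvLevel (pvCandA bank) v F).2 = []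
        · rw [hemp]
          simp only [List.map_nil]
          rw [pvLoopA_nil]
          have h0 : pvNew bank v.toFinset F.toFinset = ∅ := by
            rw [← hf2, hemp]; simp
          rw [h0, pvAbs_nil]
        · have hnewne : (pvNew bank v.toFinset F.toFinset).Nonempty := by
            rcases List.exists_mem_of_ne_nil _ hemp with ⟨x, hx⟩
            exact ⟨x, hf2 ▸ List.mem_toFinset.mpr hx⟩
          have hsub := pvNew_subset bank v.toFinset F.toFinset
          have hcard := pvMu_level bank v.toFinset (pvNew bank v.toFinset F.toFinset) hsub
          have hccard : 1 ≤ (pvNew bank v.toFinset F.toFinset).card :=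
            Finset.card_pos.mpr hnewne
          have hlen1 : (pvLevel (pvCandA bank) v F).2.length =
              (pvNew bank v.toFinset F.toFinset).card := by
            rw [← hf2, List.toFinset_card_of_nodup hnd1]
          have hFlen : F.length ≤ fA := by omega
          have hrec := ih (pvMu bank (pvLevel (pvCandA bank) v F).1.toFinset)
            (by rw [hf1]; omega)
            (pvLevel (pvCandA bank) v F).1 (pvLevel (pvCandA bank) v F).2 (d + 1)
            (fA - F.length) k' le_rfl hnd1
            (by rw [hf1]; omega) (by rw [hf1]; omega)
          rw [hrec, hf1, hf2]

-- B's loop computes the abstract BFS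
lemma pvLoopB_abs (bank : List String) (e : String) :
    ∀ (m : Nat) (v : PySem.Set String) (F : List String) (d : Int) (fB k : Nat),
      pvMu bank v.toFinset ≤ m → F.Nodup →
      pvMu bank v.toFinset + 2 ≤ fB → pvMu bank v.toFinset < k →
      pvLoopB bank e fB v F d = pvAbs bank e k v.toFinset F.toFinset d := by
  intro m
  induction m using Nat.strong_induction_on with
  | _ m ih =>
    intro v F d fB k hm hnd hfB hk
    obtain ⟨k', rfl⟩ : ∃ k', k = k' + 1 := ⟨k - 1, by omega⟩
    rcases F with _ | ⟨g, F'⟩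
    · rw [pvLoopB_nil, List.toFinset_nil, pvAbs_nil]
    · obtain ⟨f, rfl⟩ : ∃ f, fB = f + 1 := ⟨fB - 1, by omega⟩
      rw [pvLoopB]
      swap
      · simp
      have hFne : (g :: F').toFinset ≠ ∅ := by simp
      by_cases he : e ∈ g :: F'
      · rw [if_pos he, pvAbs, if_neg hFne, if_pos (List.mem_toFinset.mpr he)]
      · rw [if_neg he, pvAbs, if_neg hFne, if_neg (fun h => he (List.mem_toFinset.mp h))]
        simp only [pvInnerB_eq]
        have hfold : (g :: F').foldl (fun st gene => (pvCandB bank gene).foldl pvStep st)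
            (v, ([] : List String)) = pvLevel (pvCandB bank) v (g :: F') := rfl
        rw [hfold]
        obtain ⟨hf1, hf2, hnd1⟩ := pvLevel_finsets bank (pvCandB bank)
          (fun g x => (pvCand_mem bank g x).2) v (g :: F')
        by_cases hemp : (pvLevel (pvCandB bank) v (g :: F')).2 = []
        · rw [hemp, pvLoopB_nil]
          have h0 : pvNew bank v.toFinset (g :: F').toFinset = ∅ := by
            rw [← hf2, hemp]; simp
          rw [h0, pvAbs_nil]
        · have hnewne : (pvNew bank v.toFinset (g :: F').toFinset).Nonempty := by
            rcases List.exists_mem_of_ne_nil _ hemp with ⟨x, hx⟩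
            exact ⟨x, hf2 ▸ List.mem_toFinset.mpr hx⟩
          have hsub := pvNew_subset bank v.toFinset (g :: F').toFinset
          have hcard := pvMu_level bank v.toFinset
            (pvNew bank v.toFinset (g :: F').toFinset) hsub
          have hccard : 1 ≤ (pvNew bank v.toFinset (g :: F').toFinset).card :=
            Finset.card_pos.mpr hnewne
          have hrec := ih (pvMu bank (pvLevel (pvCandB bank) v (g :: F')).1.toFinset)
            (by rw [hf1]; omega)
            (pvLevel (pvCandB bank) v (g :: F')).1 (pvLevel (pvCandB bank) v (g :: F')).2
            (d + 1) f k' le_rfl hnd1 (by rw [hf1]; omega) (by rw [hf1]; omega)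
          rw [hrec, hf1, hf2]

-- ===== VERDICT (by name: the statement is the Claim_ definition above) =====
theorem minMutation_spec : Claim_equal_minMutation := by
  intro s e bank _
  unfold Spec_minMutation minMutation minMutation_alt
  by_cases he : e ∈ bank
  · simp only [he, not_true_eq_false, if_false]
    have hof : PySem.Set.ofList [s] = [s] :=
      PySem.Set.ofList_eq_self_of_nodup [s] (List.nodup_singleton s)
    rw [hof]
    have hmu : pvMu bank (([s] : List String).toFinset) ≤ bank.length := by
      unfold pvMu
      calc (bank.toFinset \ ([s] : List String).toFinset).card
          ≤ bank.toFinset.card := Finset.card_le_card Finset.sdiff_subset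
        _ ≤ bank.length := bank.toFinset_card_le
    have hA := pvLoopA_abs bank e (pvMu bank (([s] : List String).toFinset))
      [s] [s] 0 (bank.length + 1) (bank.length + 2) le_rfl (List.nodup_singleton s)
      (by simp only [List.length_singleton]; omega) (by omega)
    have hB := pvLoopB_abs bank e (pvMu bank (([s] : List String).toFinset))
      [s] [s] 0 (bank.length + 2) (bank.length + 2) le_rfl (List.nodup_singleton s)
      (by omega) (by omega)
    have hq : [(s, (0 : Int))] = ([s] : List String).map (fun x => (x, (0 : Int))) := rfl
    rw [hq, hA, hB]
  · simp [he]
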